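-- pv_equiv track=rewrite | github.com/NewGuanDanModel/EnhancedGuanDan | actor_n/utils/utils2.py | hasStraightFlushFrom
-- ===== SOURCE A (Python) =====
-- from typing import List, Optional
--
-- def hasStraightFlushFrom(cNS : List, index : int, remain : int, heart_level_num : int) -> bool:
--     if remain == 0:
--         return True
--     if cNS[index] == 0:
--         if heart_level_num == 0:
--             return False
--         else:
--             return hasStraightFlushFrom(cNS, index + 1, remain - 1, heart_level_num - 1)
--     else:
--         return hasStraightFlushFrom(cNS, index + 1, remain - 1, heart_level_num)
-- ===== SOURCE B (Python) =====
-- def hasStraightFlushFrom(cNS, index, remain, heart_level_num):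
--     window = [cNS[index + k] for k in range(remain)]
--     return window.count(0) <= heart_level_num
-- ===== Notes on version B (the rewrite author's own statement) =====
-- stated objective: simpler
-- what changed: Replaces the stateful recursive walk (decrementing a wildcard counter at each zero, early-exiting) by building the requested window and comparing its zero count against the heart wildcard budget in one expression; …
-- intended difference: On inputs with negative heart_level_num, A returns True whenever its walk completes (its 'heart_level_num == 0' test never fires, so a negative wildcard budget accidentally acts as unlimited wildcards), while B returns False: a negative budget affords no wildcards, which is the intended reading of a card count. — e.g. on hasStraightFlushFrom([0], 0, 1, -1): A returns true, B returns false
-- outside the precondition, e.g. on hasStraightFlushFrom([0, 1], 0, 5, 0): A returns False, B raises IndexError; on hasStraightFlushFrom([1, 0], 0, -1, 0): A returns False, B returns True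
import Mathlib
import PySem

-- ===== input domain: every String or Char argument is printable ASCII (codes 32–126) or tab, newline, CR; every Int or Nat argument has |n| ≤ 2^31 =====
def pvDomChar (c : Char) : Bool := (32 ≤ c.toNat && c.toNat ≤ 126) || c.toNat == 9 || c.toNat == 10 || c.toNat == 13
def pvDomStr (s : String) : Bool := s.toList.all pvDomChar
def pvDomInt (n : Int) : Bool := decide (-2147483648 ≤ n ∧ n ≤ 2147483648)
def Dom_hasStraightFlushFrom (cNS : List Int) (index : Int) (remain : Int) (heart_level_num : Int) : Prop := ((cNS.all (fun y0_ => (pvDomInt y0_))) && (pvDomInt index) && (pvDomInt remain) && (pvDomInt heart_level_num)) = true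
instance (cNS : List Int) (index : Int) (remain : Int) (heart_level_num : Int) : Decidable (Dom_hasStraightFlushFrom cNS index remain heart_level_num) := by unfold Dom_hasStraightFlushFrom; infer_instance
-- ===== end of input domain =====

-- B replaces A's stateful recursive walk by building the requested window and counting its zeros against the
-- wildcard budget (simpler); on negative budgets (D_) B returns False where A's walk accidentally treats the
-- budget as unlimited.


-- ===== PORT A =====
def hasStraightFlushFrom (cNS : List Int) (index : Int) (remain : Int) (heart_level_num : Int) : Bool :=
  if _h1 : remain == 0 then true
  else
    match _hget : PySem.List.pyGet? cNS index with
    | none => true  -- IndexError in Python, outside Pre_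
    | some v =>
      if v == 0 then
        if heart_level_num == 0 then false
        else hasStraightFlushFrom cNS (index + 1) (remain - 1) (heart_level_num - 1)
      else hasStraightFlushFrom cNS (index + 1) (remain - 1) heart_level_num
termination_by remain.toNat + (((cNS.length : Int) + 1 - index).toNat)
decreasing_by
  all_goals
    (simp only [beq_iff_eq] at _h1
     have hin : PySem.Raise.InRange cNS.length index := by
       by_contra hn
       rw [← PySem.List.pyGet?_eq_none_iff] at hn
       rw [hn] at _hget
       simp at _hget
     simp [PySem.Raise.InRange] at hin
     omega)

-- ===== PORT B =====
def hasStraightFlushFrom_alt (cNS : List Int) (index : Int) (remain : Int) (heart_level_num : Int) : Bool :=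
  -- window = [cNS[index + k] for k in range(remain)]  (pyGetD's default is only reached outside Pre_,
  -- where the Python raises IndexError)
  let window := (PySem.List.pyRange 0 remain 1).map (fun k => PySem.List.pyGetD cNS (index + k) 0)
  decide (((window.count 0 : Nat) : Int) ≤ heart_level_num)

-- ===== PRECONDITION & SPEC =====
-- Pre_ keeps the calls whose requested window lies inside the hand (Python indexing: a negative start counts
-- from the end). Outside it A either raises (IndexError past the end of the hand, deep recursion on a negative
-- remain) or — on overrun calls whose walk marches beyond the requested window until the wildcard budget dies at
-- a zero — returns a False that B's window construction answers by raising (out-of-range window) or by the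
-- trivial True of the empty window of a negative remain.
def Pre_hasStraightFlushFrom (cNS : List Int) (index : Int) (remain : Int) (heart_level_num : Int) : Prop :=
  remain = 0 ∨
    (0 ≤ remain ∧ -(cNS.length : Int) ≤ index ∧ index + remain ≤ cNS.length)
instance (cNS : List Int) (index : Int) (remain : Int) (heart_level_num : Int) : Decidable (Pre_hasStraightFlushFrom cNS index remain heart_level_num) := by unfold Pre_hasStraightFlushFrom; infer_instance
def pvWitness_hasStraightFlushFrom : List Int × Int × Int × Int := ([1, 0, 2], 0, 3, 1)

-- On inputs with negative heart_level_num, A returns True whenever its walk completes (its 'heart_level_num == 0'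
-- test never fires, so a negative wildcard budget accidentally acts as unlimited wildcards), while B returns
-- False — a negative budget affords no wildcards, which is the intended reading of a card count.
def D_hasStraightFlushFrom (cNS : List Int) (index : Int) (remain : Int) (heart_level_num : Int) : Prop :=
  heart_level_num < 0
instance (cNS : List Int) (index : Int) (remain : Int) (heart_level_num : Int) : Decidable (D_hasStraightFlushFrom cNS index remain heart_level_num) := by unfold D_hasStraightFlushFrom; infer_instance

def Spec_hasStraightFlushFrom (cNS : List Int) (index : Int) (remain : Int) (heart_level_num : Int) (out : Bool) : Prop := ¬ D_hasStraightFlushFrom cNS index remain heart_level_num → out = hasStraightFlushFrom_alt cNS index remain heart_level_num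
instance (cNS : List Int) (index : Int) (remain : Int) (heart_level_num : Int) (out : Bool) : Decidable (Spec_hasStraightFlushFrom cNS index remain heart_level_num out) := by unfold Spec_hasStraightFlushFrom; infer_instance

def pvDiffWitness_hasStraightFlushFrom : List Int × Int × Int × Int := ([0], 0, 1, -1)
def pvDiffWitnessOut_hasStraightFlushFrom : Bool × Bool := (true, false)

-- ===== CLAIM (what is proved, stated in full; the proofs are below) =====
def Claim_unchanged_hasStraightFlushFrom : Prop := ∀ (cNS : List Int) (index : Int) (remain : Int) (heart_level_num : Int), Dom_hasStraightFlushFrom cNS index remain heart_level_num → Pre_hasStraightFlushFrom cNS index remain heart_level_num → Spec_hasStraightFlushFrom cNS index remain heart_level_num (hasStraightFlushFrom cNS index remain heart_level_num)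
def Claim_changed_hasStraightFlushFrom : Prop := Dom_hasStraightFlushFrom (pvDiffWitness_hasStraightFlushFrom.1) (pvDiffWitness_hasStraightFlushFrom.2.1) (pvDiffWitness_hasStraightFlushFrom.2.2.1) (pvDiffWitness_hasStraightFlushFrom.2.2.2) ∧ Pre_hasStraightFlushFrom (pvDiffWitness_hasStraightFlushFrom.1) (pvDiffWitness_hasStraightFlushFrom.2.1) (pvDiffWitness_hasStraightFlushFrom.2.2.1) (pvDiffWitness_hasStraightFlushFrom.2.2.2) ∧ D_hasStraightFlushFrom (pvDiffWitness_hasStraightFlushFrom.1) (pvDiffWitness_hasStraightFlushFrom.2.1) (pvDiffWitness_hasStraightFlushFrom.2.2.1) (pvDiffWitness_hasStraightFlushFrom.2.2.2) ∧ hasStraightFlushFrom (pvDiffWitness_hasStraightFlushFrom.1) (pvDiffWitness_hasStraightFlushFrom.2.1) (pvDiffWitness_hasStraightFlushFrom.2.2.1) (pvDiffWitness_hasStraightFlushFrom.2.2.2) = pvDiffWitnessOut_hasStraightFlushFrom.1 ∧ hasStraightFlushFrom_alt (pvDiffWitness_hasStraightFlushFrom.1) (pvDiffWitness_hasStraightFlushFrom.2.1)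 (pvDiffWitness_hasStraightFlushFrom.2.2.1) (pvDiffWitness_hasStraightFlushFrom.2.2.2) = pvDiffWitnessOut_hasStraightFlushFrom.2 ∧ pvDiffWitnessOut_hasStraightFlushFrom.1 ≠ pvDiffWitnessOut_hasStraightFlushFrom.2
def Claim_exact_hasStraightFlushFrom : Prop := ∀ (cNS : List Int) (index : Int) (remain : Int) (heart_level_num : Int), Dom_hasStraightFlushFrom cNS index remain heart_level_num → Pre_hasStraightFlushFrom cNS index remain heart_level_num → D_hasStraightFlushFrom cNS index remain heart_level_num → hasStraightFlushFrom cNS index remain heart_level_num ≠ hasStraightFlushFrom_alt cNS index remain heart_level_num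

-- ===== LEMMAS AND PROOFS =====

-- Unfolding equations for A's walk
lemma pv_walk_zero (cNS : List Int) (index hl : Int) :
    hasStraightFlushFrom cNS index 0 hl = true := by
  rw [hasStraightFlushFrom]
  simp

lemma pv_walk_some (cNS : List Int) (index remain hl v : Int) (hr : remain ≠ 0)
    (hget : PySem.List.pyGet? cNS index = some v) :
    hasStraightFlushFrom cNS index remain hl =
      if v == 0 then
        if hl == 0 then false
        else hasStraightFlushFrom cNS (index + 1) (remain - 1) (hl - 1)
      else hasStraightFlushFrom cNS (index + 1) (remain - 1) hl := by
  rw [hasStraightFlushFrom]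
  rw [dif_neg (by simp [hr])]
  split
  · rename_i heq
    rw [hget] at heq
    cases heq
  · rename_i w heq
    rw [hget] at heq
    cases heq
    rfl

-- pvPath cNS index: the elements A's walk visits from `index` until it would fall off the end.
def pvPath (cNS : List Int) (index : Int) : List Int :=
  if index < 0 then cNS.drop ((cNS.length : Int) + index).toNat ++ cNS
  else cNS.drop index.toNat

-- The head and tail of A's remaining walk path
lemma pvPath_head (cNS : List Int) (index : Int) (h1 : -(cNS.length : Int) ≤ index)
    (h2 : index < cNS.length) :
    PySem.List.pyGet? cNS index = (pvPath cNS index).head? := by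
  unfold pvPath
  by_cases hneg : index < 0
  · have hx : -(((-index).toNat : Nat) : Int) = index := by omega
    have h := PySem.List.pyGet?_neg_natCast cNS (-index).toNat (by omega) (by omega)
    rw [hx] at h
    rw [h, if_pos hneg]
    have hlt : ((cNS.length : Int) + index).toNat < cNS.length := by omega
    rw [List.head?_append_of_ne_nil]
    · rw [List.head?_drop]
      congr 1
      omega
    · intro hnil
      have := congrArg List.length hnil
      simp at this
      omega
  · rw [if_neg hneg, PySem.List.pyGet?_of_nonneg cNS (by omega)]
    rw [List.head?_drop]

lemma pvPath_tail (cNS : List Int) (index : Int) (h1 : -(cNS.length : Int) ≤ index)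
    (h2 : index < cNS.length) :
    pvPath cNS (index + 1) = (pvPath cNS index).tail := by
  unfold pvPath
  by_cases hneg : index < 0
  · have hne : cNS.drop ((cNS.length : Int) + index).toNat ≠ [] := by
      intro hnil
      have := congrArg List.length hnil
      simp at this
      omega
    rw [if_pos hneg, List.tail_append_of_ne_nil hne, List.tail_drop]
    by_cases hneg1 : index + 1 < 0
    · rw [if_pos hneg1]
      congr 2
      omega
    · rw [if_neg hneg1,
        show ((((cNS.length : Int) + index).toNat) + 1) = cNS.length from by omega,
        List.drop_length, List.nil_append,
        show (index + 1).toNat = 0 from by omega, List.drop_zero]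
  · rw [if_neg hneg, if_neg (by omega), List.tail_drop]
    congr 1
    omega

-- pyGetD agrees with pyGet? on every in-range index
lemma pv_getD_eq (cNS : List Int) (i : Int) (h1 : -(cNS.length : Int) ≤ i)
    (h2 : i < cNS.length) :
    PySem.List.pyGet? cNS i = some (PySem.List.pyGetD cNS i 0) := by
  by_cases hneg : i < 0
  · have hx : -(((-i).toNat : Nat) : Int) = i := by omega
    have ha := PySem.List.pyGet?_neg_natCast cNS (-i).toNat (by omega) (by omega)
    have hb := PySem.List.pyGetD_neg_natCast cNS (-i).toNat 0 (by omega) (by omega)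
    rw [hx] at ha hb
    rw [ha, hb, List.getElem?_eq_getElem]
  · rw [PySem.List.pyGet?_eq_some_getElem cNS (by omega) (by exact_mod_cast h2),
      PySem.List.pyGetD_eq_getElem cNS 0 (by omega) (by exact_mod_cast h2)]

-- One step of the wildcard budget, at the Bool level
lemma pv_bool_step (hl c : Int) (hhl : hl ≠ 0) :
    (!(decide (0 ≤ hl - 1) && decide (hl - 1 < c))) = (!(decide (0 ≤ hl) && decide (hl < c + 1))) := by
  by_cases h0 : 0 ≤ hl
  · have hc : (hl - 1 < c) ↔ (hl < c + 1) := by omega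
    simp [h0, hc]
    omega
  · simp [h0]
    omega

-- Core invariant of A's walk: when the requested window lies inside the hand, A's verdict is
-- "with a non-negative budget, zeros in the window ≤ budget".
lemma pv_walk_key (cNS : List Int) :
    ∀ (k : Nat) (index r hl : Int), (cNS.length : Int) - index ≤ k →
      -(cNS.length : Int) ≤ index → 0 ≤ r → index + r ≤ cNS.length →
      hasStraightFlushFrom cNS index r hl
        = !(decide (0 ≤ hl) &&
            decide (hl < ((((pvPath cNS index).take r.toNat).count 0 : Nat) : Int))) := by
  intro k
  induction k with
  | zero =>
    intro index r hl hk hlo h0r hhi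
    have hr0 : r = 0 := by omega
    subst hr0
    rw [pv_walk_zero]
    simp
    omega
  | succ k ih =>
    intro index r hl hk hlo h0r hhi
    by_cases hr0 : r = 0
    · subst hr0
      rw [pv_walk_zero]
      simp
      omega
    · have hidx : index < cNS.length := by omega
      obtain ⟨v, hget⟩ : ∃ v, PySem.List.pyGet? cNS index = some v :=
        ⟨_, pv_getD_eq cNS index hlo hidx⟩
      have hhead : (pvPath cNS index).head? = some v := by
        rw [← pvPath_head cNS index hlo hidx]
        exact hget
      obtain ⟨rest, hpath⟩ : ∃ rest, pvPath cNS index = v :: rest := by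
        cases hp : pvPath cNS index with
        | nil => rw [hp] at hhead; cases hhead
        | cons a l =>
          rw [hp] at hhead
          simp at hhead
          exact ⟨l, by rw [hhead]⟩
      have htail : pvPath cNS (index + 1) = rest := by
        rw [pvPath_tail cNS index hlo hidx, hpath]
        rfl
      have htake : (pvPath cNS index).take r.toNat = v :: rest.take (r - 1).toNat := by
        rw [hpath, show r.toNat = (r - 1).toNat + 1 from by omega, List.take_succ_cons]
      rw [pv_walk_some cNS index r hl v hr0 hget, htake]
      have hrec := ih (index + 1) (r - 1) (hl - 1) (by omega) (by omega) (by omega) (by omega)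
      have hrec' := ih (index + 1) (r - 1) hl (by omega) (by omega) (by omega) (by omega)
      rw [htail] at hrec hrec'
      by_cases hv : v = 0
      · by_cases hhl : hl = 0
        · subst hv hhl
          simp
        · have hbeq : (hl == 0) = false := by simp [hhl]
          simp only [hv, beq_self_eq_true, if_true, hbeq, Bool.false_eq_true, if_false, hrec,
            List.count_cons_self]
          push_cast
          exact pv_bool_step hl _ hhl
      · have hbeq : (v == 0) = false := by simp [hv]
        simp only [hbeq, Bool.false_eq_true, if_false, hrec',
          List.count_cons, beq_iff_eq, hv, if_false, add_zero]

-- B's window is the first `remain` cards of A's walk path.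
lemma pv_window (cNS : List Int) (r : Nat) :
    ∀ (index a : Int), -(cNS.length : Int) ≤ index + a → (index + a) + r ≤ cNS.length →
      ((PySem.List.pyRange a (a + r) 1).map (fun k => PySem.List.pyGetD cNS (index + k) 0))
        = (pvPath cNS (index + a)).take r := by
  induction r with
  | zero =>
    intro index a _ _
    simp [PySem.List.pyRange]
  | succ r ih =>
    intro index a hlo hhi
    have hcons : PySem.List.pyRange a (a + ((r : Int) + 1)) 1
        = a :: PySem.List.pyRange (a + 1) (a + ((r : Int) + 1)) 1 :=
      PySem.List.pyRange_one_cons (by omega)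
    have hidx : index + a < cNS.length := by push_cast at hhi; omega
    obtain ⟨v, hget⟩ : ∃ v, PySem.List.pyGet? cNS (index + a) = some v :=
      ⟨_, pv_getD_eq cNS (index + a) hlo hidx⟩
    have hv : PySem.List.pyGetD cNS (index + a) 0 = v := by
      have := pv_getD_eq cNS (index + a) hlo hidx
      rw [hget] at this
      exact (Option.some_inj.mp this).symm
    have hhead : (pvPath cNS (index + a)).head? = some v := by
      rw [← pvPath_head cNS (index + a) hlo hidx]
      exact hget
    obtain ⟨rest, hpath⟩ : ∃ rest, pvPath cNS (index + a) = v :: rest := by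
      cases hp : pvPath cNS (index + a) with
      | nil => rw [hp] at hhead; cases hhead
      | cons x l =>
        rw [hp] at hhead
        simp at hhead
        exact ⟨l, by rw [hhead]⟩
    have htail : pvPath cNS (index + (a + 1)) = rest := by
      rw [show index + (a + 1) = (index + a) + 1 from by ring,
        pvPath_tail cNS (index + a) hlo hidx, hpath]
      rfl
    have hshift : a + ((r : Int) + 1) = (a + 1) + (r : Int) := by ring
    push_cast
    rw [hcons, List.map_cons, hv, hshift,
      ih index (a + 1) (by omega) (by push_cast; omega)]
    rw [htail, hpath, List.take_succ_cons]

-- ===== VERDICT (by name: the statements are the Claim_ definitions above) =====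
theorem hasStraightFlushFrom_spec : Claim_unchanged_hasStraightFlushFrom := by
  intro cNS index remain heart_level_num _hdom hpre hnD
  unfold D_hasStraightFlushFrom at hnD
  have hhl : 0 ≤ heart_level_num := by omega
  unfold hasStraightFlushFrom_alt
  rcases hpre with hr0 | ⟨hr, hlo, hhi⟩
  · subst hr0
    rw [pv_walk_zero]
    simp [PySem.List.pyRange, hhl]
  · obtain ⟨r, rfl⟩ : ∃ r : Nat, remain = (r : Int) := ⟨remain.toNat, (Int.toNat_of_nonneg hr).symm⟩
    have hwin := pv_window cNS r index 0 (by omega) (by omega)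
    rw [zero_add] at hwin
    rw [hwin, add_zero]
    rw [pv_walk_key cNS (2 * cNS.length) index (r : Int) heart_level_num (by push_cast; omega)
      hlo (by omega) hhi]
    rw [show ((r : Int)).toNat = r from by omega]
    by_cases hlt : heart_level_num < ((((pvPath cNS index).take r).count 0 : Nat) : Int)
    · simp [hhl, hlt]
    · simp [hhl, hlt]
      omega

theorem hasStraightFlushFrom_changed : Claim_changed_hasStraightFlushFrom := by
  unfold Claim_changed_hasStraightFlushFrom
  refine ⟨by decide, by decide, by decide, ?_, by decide, by decide⟩
  show hasStraightFlushFrom [0] 0 1 (-1) = true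
  rw [pv_walk_some [0] 0 1 (-1) 0 (by decide) (by decide)]
  norm_num [pv_walk_zero]

theorem hasStraightFlushFrom_tight : Claim_exact_hasStraightFlushFrom := by
  intro cNS index remain heart_level_num _hdom hpre hD
  unfold D_hasStraightFlushFrom at hD
  have hB : hasStraightFlushFrom_alt cNS index remain heart_level_num = false := by
    unfold hasStraightFlushFrom_alt
    simp
    omega
  have hA : hasStraightFlushFrom cNS index remain heart_level_num = true := by
    rcases hpre with hr0 | ⟨hr, hlo, hhi⟩
    · subst hr0
      exact pv_walk_zero cNS index heart_level_num
    · rw [pv_walk_key cNS (2 * cNS.length) index remain heart_level_num (by push_cast; omega)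
        hlo hr hhi]
      simp
      omega
  rw [hA, hB]
  simp
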